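-- pv_equiv track=rewrite | github.com/htang7415/PolyDiT | Multi_View_Foundation/scripts/step8_build_paper_package.py | _ordered_properties
-- ===== SOURCE A (Python) =====
-- from typing import Iterable, Optional, Sequence
--
-- PROPERTY_PRIORITY = [
--     "Tg",
--     "Tm",
--     "Td",
--     "Eg",
--     "Ced",
--     "Ea",
--     "Eib",
--     "In",
-- ]
--
-- def _ordered_properties(values: Iterable[object]) -> list[str]:
--     """Return stable property ordering with configured priority first."""
--     by_lower: dict[str, str] = {}
--     for raw in values:
--         text = str(raw).strip()
--         if not text:
--             continue
--         key = text.lower()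
--         if key not in by_lower:
--             by_lower[key] = text
--
--     ordered: list[str] = []
--     for prop in PROPERTY_PRIORITY:
--         key = prop.lower()
--         if key in by_lower:
--             ordered.append(by_lower.pop(key))
--
--     for key in sorted(by_lower):
--         ordered.append(by_lower[key])
--     return ordered
-- ===== SOURCE B (Python) =====
-- PROPERTY_PRIORITY = [
--     "Tg",
--     "Tm",
--     "Td",
--     "Eg",
--     "Ced",
--     "Ea",
--     "Eib",
--     "In",
-- ]
--
-- def _ordered_properties(values):
--     """Priority-ranked single sort over the case-insensitively deduplicated texts."""
--     by_lower = {}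
--     for raw in values:
--         text = str(raw).strip()
--         if not text:
--             continue
--         key = text.lower()
--         if key not in by_lower:
--             by_lower[key] = text
--
--     rank = {prop.lower(): i for i, prop in enumerate(PROPERTY_PRIORITY)}
--     return sorted(
--         by_lower.values(),
--         key=lambda t: (rank.get(t.lower(), len(PROPERTY_PRIORITY)), t.lower()),
--     )
-- ===== Notes on version B (the rewrite author's own statement) =====
-- stated objective: idiomatic
-- what changed: A's two-phase ordering (pop each priority key from the dict in priority order, then append the remaining values by sorted lowercase key) is replaced by one single sorted() call over the deduplicated texts with the composite key (priority rank with sentinel len(PROPERTY_PRIORITY), lowercase text).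
import Mathlib
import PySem

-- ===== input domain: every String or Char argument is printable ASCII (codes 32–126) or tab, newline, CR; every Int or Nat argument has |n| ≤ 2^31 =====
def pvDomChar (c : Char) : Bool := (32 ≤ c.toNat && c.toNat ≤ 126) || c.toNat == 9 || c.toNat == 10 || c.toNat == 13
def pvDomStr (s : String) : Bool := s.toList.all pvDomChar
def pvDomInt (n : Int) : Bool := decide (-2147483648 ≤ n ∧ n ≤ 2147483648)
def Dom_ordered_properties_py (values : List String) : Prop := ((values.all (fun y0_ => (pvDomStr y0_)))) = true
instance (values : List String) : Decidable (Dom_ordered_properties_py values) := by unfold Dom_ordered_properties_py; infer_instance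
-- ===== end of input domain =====

-- B replaces A's two-phase "pop the priority keys, then sort the remaining keys" by ONE sort
-- of the deduplicated texts under the key (priority rank, lowercase); objective: idiomatic.

-- ===== PORT A =====
def propertyPriority : List String := ["Tg", "Tm", "Td", "Eg", "Ced", "Ea", "Eib", "In"]

-- first loop of BOTH Pythons: case-insensitive dedup keeping the first stripped text
def buildByLower (values : List String) : PySem.Dict String String :=
  values.foldl (fun d raw =>
    let text := PySem.Str.strip raw
    if text = "" then d
    else
      let key := PySem.Str.lower text
      if d.contains key then d else d.insert key text) PySem.Dict.empty

def ordered_properties_py (values : List String) : List String :=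
  let byLower := buildByLower values
  let st :=
    propertyPriority.foldl (fun (st : List String × PySem.Dict String String) prop =>
      let key := PySem.Str.lower prop
      if st.2.contains key then
        match st.2.pop? key with
        | some (v, d') => (st.1 ++ [v], d')
        | none => st
      else st) ([], byLower)
  -- Python's by_lower[key] with key drawn from the dict's own keys: getD "" is exact here
  st.1 ++ (PySem.List.sorted st.2.keys (fun k => k) false).map (fun k => st.2.getD k "")

-- ===== PORT B =====
def propertyRank : PySem.Dict String Int :=
  PySem.Dict.ofList ((PySem.List.enumerate propertyPriority).map
    (fun p => (PySem.Str.lower p.2, p.1)))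

def ordered_properties_py_alt (values : List String) : List String :=
  let byLower := buildByLower values
  PySem.List.sorted byLower.values
    (fun t => toLex (propertyRank.getD (PySem.Str.lower t) ((propertyPriority.length : Nat) : Int),
                     PySem.Str.lower t)) false

-- ===== PRECONDITION & SPEC =====
def Spec_ordered_properties_py (values : List String) (out : List String) : Prop := out = ordered_properties_py_alt values
instance (values : List String) (out : List String) : Decidable (Spec_ordered_properties_py values out) := by unfold Spec_ordered_properties_py; infer_instance

-- ===== CLAIM (what is proved, stated in full; the proofs are below) =====
def Claim_equal_ordered_properties_py : Prop := ∀ (values : List String), Dom_ordered_properties_py values → Spec_ordered_properties_py values (ordered_properties_py values)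

-- ===== LEMMAS AND PROOFS =====

-- abbreviations used only by the proofs
def priorLowers : List String := propertyPriority.map PySem.Str.lower

def rk (k : String) : Int := propertyRank.getD k ((propertyPriority.length : Nat) : Int)

def Kf (t : String) : Int ×ₗ String := toLex (rk (PySem.Str.lower t), PySem.Str.lower t)

def popsOf (d : PySem.Dict String String) : List String :=
  propertyPriority.filterMap (fun p => d.get? (PySem.Str.lower p))

def restDict (d : PySem.Dict String String) : PySem.Dict String String :=
  PySem.Dict.mk (d.items.filter (fun pr => !(priorLowers.contains pr.1)))

def restMap (d : PySem.Dict String String) : List String :=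
  (PySem.List.sorted (restDict d).keys (fun k => k) false).map (fun k => (restDict d).getD k "")

-- the dedup dict's invariant: keys are unique and each key is the lowercase of its value
def DictInv (d : PySem.Dict String String) : Prop :=
  d.keys.Nodup ∧ ∀ p ∈ d.items, p.1 = PySem.Str.lower p.2

theorem dictInv_step (l : List String) : ∀ (d : PySem.Dict String String), DictInv d →
    DictInv (l.foldl (fun d raw =>
      let text := PySem.Str.strip raw
      if text = "" then d
      else
        let key := PySem.Str.lower text
        if d.contains key then d else d.insert key text) d) := by
  induction l with
  | nil => intro d hd; exact hd
  | cons raw rest ih =>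
    intro d hd
    simp only [List.foldl_cons]
    apply ih
    by_cases h1 : PySem.Str.strip raw = ""
    · simpa [h1] using hd
    · by_cases h2 : d.contains (PySem.Str.lower (PySem.Str.strip raw))
      · simpa [h1, h2] using hd
      · simp only [h1, h2, if_false, Bool.false_eq_true]
        constructor
        · exact PySem.Dict.nodup_keys_insert _ _ _ hd.1
        · intro p hp
          rw [PySem.Dict.items_insert_of_not_contains _ _ (by simpa using h2)] at hp
          rcases List.mem_append.1 hp with h | h
          · exact hd.2 p h
          · simp at h; subst h; rfl

theorem dictInv_build (values : List String) : DictInv (buildByLower values) := by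
  apply dictInv_step
  constructor
  · simp [PySem.Dict.empty, PySem.Dict.keys]
  · intro p hp; simp [PySem.Dict.empty] at hp

theorem find?_filter_ne (k k' : String) (h : k' ≠ k) (l : List (String × String)) :
    List.find? (fun p => p.1 == k') (List.filter (fun p => !p.1 == k) l)
      = List.find? (fun p => p.1 == k') l := by
  induction l with
  | nil => rfl
  | cons p rest ih =>
    by_cases hpk : p.1 = k
    · have h1 : (p.1 == k) = true := by simpa using hpk
      have h2 : (p.1 == k') = false := by simp [hpk]; exact fun e => h e.symm
      simp [h1, h2, ih]
    · have h1 : (p.1 == k) = false := by simpa using hpk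
      by_cases hpk' : p.1 = k'
      · have h2 : (p.1 == k') = true := by simpa using hpk'
        simp [h1, h2]
      · have h2 : (p.1 == k') = false := by simpa using hpk'
        simp [h1, h2, ih]

theorem get?_erase_of_ne (d : PySem.Dict String String) (k k' : String) (h : k' ≠ k) :
    (d.erase k).get? k' = d.get? k' := by
  unfold PySem.Dict.erase PySem.Dict.get?
  simp only [find?_filter_ne k k' h]

theorem get?_none_of_not_contains (d : PySem.Dict String String) (k : String)
    (h : d.contains k = false) : d.get? k = none := by
  have := PySem.Dict.contains_eq_isSome_get? d k
  rw [h] at this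
  exact Option.not_isSome_iff_eq_none.1 (by rw [← this]; simp)

theorem get?_some_of_contains (d : PySem.Dict String String) (k : String)
    (h : d.contains k = true) : ∃ v, d.get? k = some v := by
  have := PySem.Dict.contains_eq_isSome_get? d k
  rw [h] at this
  exact Option.isSome_iff_exists.1 this.symm

theorem not_mem_key_of_not_contains (d : PySem.Dict String String) (k : String)
    (h : d.contains k = false) (p : String × String) (hp : p ∈ d.items) : p.1 ≠ k := by
  intro e
  have : d.contains k = true := by
    rcases d with ⟨items⟩
    rw [PySem.Dict.contains_mk]
    exact List.any_eq_true.2 ⟨p, hp, by simpa using e⟩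
  rw [h] at this; exact Bool.false_ne_true this

-- the closed form of A's priority fold
theorem foldA_spec (ps : List String) (acc : List String) (d : PySem.Dict String String)
    (hnd : (ps.map PySem.Str.lower).Nodup) :
    ps.foldl (fun (st : List String × PySem.Dict String String) prop =>
      let key := PySem.Str.lower prop
      if st.2.contains key then
        match st.2.pop? key with
        | some (v, d') => (st.1 ++ [v], d')
        | none => st
      else st) (acc, d)
    = (acc ++ ps.filterMap (fun p => d.get? (PySem.Str.lower p)),
       PySem.Dict.mk (d.items.filter (fun pr => !((ps.map PySem.Str.lower).contains pr.1)))) := by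
  induction ps generalizing acc d with
  | nil => simp
  | cons p ps ih =>
    simp only [List.map_cons, List.nodup_cons] at hnd
    obtain ⟨hnotin, hnd'⟩ := hnd
    simp only [List.foldl_cons, List.filterMap_cons]
    by_cases hc : d.contains (PySem.Str.lower p) = true
    · obtain ⟨v, hv⟩ := get?_some_of_contains d _ hc
      have hpop : d.pop? (PySem.Str.lower p) = some (v, d.erase (PySem.Str.lower p)) := by
        unfold PySem.Dict.pop?; rw [hv]; rfl
      simp only [hc, if_true, hpop, hv]
      rw [ih (acc ++ [v]) (d.erase (PySem.Str.lower p)) hnd']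
      refine Prod.ext ?_ ?_
      · rw [List.append_assoc, List.singleton_append]
        refine congrArg (acc ++ ·) (congrArg (v :: ·) ?_)
        apply List.filterMap_congr
        intro q hq
        apply get?_erase_of_ne
        intro e
        exact hnotin (e ▸ List.mem_map_of_mem hq)
      · show PySem.Dict.mk _ = PySem.Dict.mk _
        congr 1
        unfold PySem.Dict.erase
        rw [List.filter_filter]
        apply List.filter_congr
        intro pr _
        simp only [List.map_cons, List.contains_cons]
        cases hbe : (pr.1 == PySem.Str.lower p) <;>
          simp [hbe, BEq.comm (a := pr.1)]
    · have hcf : d.contains (PySem.Str.lower p) = false := by simpa using hc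
      have hnone : d.get? (PySem.Str.lower p) = none := get?_none_of_not_contains d _ hcf
      simp only [hc, if_false, hnone, Bool.false_eq_true]
      rw [ih acc d hnd']
      refine Prod.ext rfl ?_
      · show PySem.Dict.mk _ = PySem.Dict.mk _
        congr 1
        apply List.filter_congr
        intro pr hpr
        have hne := not_mem_key_of_not_contains d _ hcf pr hpr
        simp only [List.map_cons, List.contains_cons]
        simp only [Bool.not_eq_eq_eq_not, Bool.not_not]
        cases hbe : ((ps.map PySem.Str.lower).contains pr.1) <;>
          simp_all [List.contains_eq_mem]

theorem nodup_keys_filter (d : PySem.Dict String String) (f : String × String → Bool)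
    (h : d.keys.Nodup) : (PySem.Dict.mk (d.items.filter f)).keys.Nodup := by
  have hs : (d.items.filter f).Sublist d.items := List.filter_sublist
  exact (hs.map Prod.fst).nodup h

theorem perm_cons_filter (k : String) (v : String) :
    ∀ (items : List (String × String)), (items.map Prod.fst).Nodup → (k, v) ∈ items →
    items.Perm ((k, v) :: items.filter (fun p => !p.1 == k)) := by
  intro items
  induction items with
  | nil => intro _ h; cases h
  | cons q rest ih =>
    intro hnd hmem
    simp only [List.map_cons, List.nodup_cons] at hnd
    rcases List.mem_cons.1 hmem with h | h
    · subst h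
      rw [List.filter_cons]
      simp only [beq_self_eq_true, Bool.not_true, Bool.false_eq_true, if_false]
      apply List.Perm.cons
      have : ∀ p ∈ rest, (!p.1 == k) = true := by
        intro p hp
        have : p.1 ≠ k := by
          intro e
          have hmm : p.1 ∈ rest.map Prod.fst := List.mem_map_of_mem hp
          exact hnd.1 (e ▸ hmm)
        simpa using this
      rw [List.filter_eq_self.2 this]
    · have hq : q.1 ≠ k := by
        intro e
        have hmm : k ∈ rest.map Prod.fst := by
          have := List.mem_map_of_mem (f := Prod.fst) h
          simpa using this
        exact hnd.1 (e ▸ hmm)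
      rw [List.filter_cons]
      have : (!q.1 == k) = true := by simpa using hq
      simp only [this, if_true]
      exact ((ih hnd.2 h).cons q).trans (List.Perm.swap _ _ _)

theorem perm_pops (ps : List String) :
    ∀ (d : PySem.Dict String String), (ps.map PySem.Str.lower).Nodup → d.keys.Nodup →
    (ps.filterMap (fun p => d.get? (PySem.Str.lower p))
      ++ (PySem.Dict.mk (d.items.filter (fun pr => !((ps.map PySem.Str.lower).contains pr.1)))).values).Perm
      d.values := by
  induction ps with
  | nil =>
    intro d _ _
    simp only [List.filterMap_nil, List.nil_append, List.map_nil]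
    have : d.items.filter (fun pr => !(([] : List String).contains pr.1)) = d.items := by
      apply List.filter_eq_self.2; intro p _; simp
    rw [this]
  | cons p ps ih =>
    intro d hnd hk
    simp only [List.map_cons, List.nodup_cons] at hnd
    obtain ⟨hnotin, hnd'⟩ := hnd
    simp only [List.filterMap_cons]
    cases hget : d.get? (PySem.Str.lower p) with
    | none =>
      have hfe : ∀ pr ∈ d.items, pr.1 ≠ PySem.Str.lower p := by
        intro pr hpr e
        rw [PySem.Dict.get?_eq_none_iff_not_mem_keys] at hget
        have hmk : pr.1 ∈ d.keys := PySem.Dict.mem_keys_of_mem_items d hpr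
        exact hget (e ▸ hmk)
      have hfilter : (d.items.filter (fun pr => !((PySem.Str.lower p :: ps.map PySem.Str.lower).contains pr.1)))
          = d.items.filter (fun pr => !((ps.map PySem.Str.lower).contains pr.1)) := by
        apply List.filter_congr
        intro pr hpr
        have := hfe pr hpr
        simp only [List.contains_cons]
        cases hbe : ((ps.map PySem.Str.lower).contains pr.1) <;> simp_all [List.contains_eq_mem]
      dsimp only
      rw [List.map_cons, hfilter]
      exact ih d hnd' hk
    | some v =>
      have hmem : (PySem.Str.lower p, v) ∈ d.items := PySem.Dict.mem_items_of_get?_eq_some d hget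
      have hone : ∀ q ∈ ps, d.get? (PySem.Str.lower q) = (d.erase (PySem.Str.lower p)).get? (PySem.Str.lower q) := by
        intro q hq
        symm
        apply get?_erase_of_ne
        intro e
        exact hnotin (e ▸ List.mem_map_of_mem (f := PySem.Str.lower) hq)
      have hfm : ps.filterMap (fun q => d.get? (PySem.Str.lower q))
          = ps.filterMap (fun q => (d.erase (PySem.Str.lower p)).get? (PySem.Str.lower q)) :=
        List.filterMap_congr hone
      have hff : (d.items.filter (fun pr => !((PySem.Str.lower p :: ps.map PySem.Str.lower).contains pr.1)))
          = ((d.erase (PySem.Str.lower p)).items.filter (fun pr => !((ps.map PySem.Str.lower).contains pr.1))) := by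
        unfold PySem.Dict.erase
        rw [List.filter_filter]
        apply List.filter_congr
        intro pr _
        simp only [List.contains_cons]
        cases hbe : (pr.1 == PySem.Str.lower p) <;> simp [hbe, BEq.comm (a := pr.1)]
      have hkerase : (d.erase (PySem.Str.lower p)).keys.Nodup := by
        unfold PySem.Dict.erase
        exact nodup_keys_filter d _ hk
      have htail := ih (d.erase (PySem.Str.lower p)) hnd' hkerase
      dsimp only
      rw [List.map_cons, List.cons_append, hfm, hff]
      have hperm : d.items.Perm ((PySem.Str.lower p, v) :: (d.erase (PySem.Str.lower p)).items) :=
        perm_cons_filter _ _ d.items hk hmem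
      have hvals : d.values.Perm (v :: (d.erase (PySem.Str.lower p)).values) := by
        have := hperm.map Prod.snd
        simpa [PySem.Dict.values] using this
      exact ((htail.cons v).trans hvals.symm)

-- literal facts about the rank dict
theorem rank_pairwise :
    List.Pairwise (fun p q => rk (PySem.Str.lower p) < rk (PySem.Str.lower q)) propertyPriority := by
  decide

theorem rank_lt : ∀ p ∈ propertyPriority,
    rk (PySem.Str.lower p) < ((propertyPriority.length : Nat) : Int) := by decide

theorem rank_keys : propertyRank.keys = priorLowers := by decide

theorem priority_lower_nodup : priorLowers.Nodup := by decide

theorem rank_default (k : String) (h : k ∉ priorLowers) :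
    rk k = ((propertyPriority.length : Nat) : Int) := by
  unfold rk
  apply PySem.Dict.getD_of_not_contains
  rw [PySem.Dict.contains_eq_decide_mem_keys, rank_keys]
  simpa using h

-- invariants carried to the rest dict
theorem restDict_inv (d : PySem.Dict String String) (h : DictInv d) : DictInv (restDict d) := by
  constructor
  · exact nodup_keys_filter d _ h.1
  · intro p hp
    exact h.2 p (List.mem_of_mem_filter hp)

theorem rest_key_fact (d : PySem.Dict String String) (h : DictInv d) (k : String)
    (hk : k ∈ (restDict d).keys) :
    PySem.Str.lower ((restDict d).getD k "") = k ∧ k ∉ priorLowers := by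
  have hinv := restDict_inv d h
  obtain ⟨pr, hpr, hfst⟩ := List.mem_map.1 hk
  have hget : (restDict d).getD k "" = pr.2 := by
    have : (k, pr.2) ∈ (restDict d).items := by
      rw [← hfst]; simpa using hpr
    exact PySem.Dict.getD_of_mem_items _ this hinv.1 _
  constructor
  · rw [hget, ← hinv.2 pr hpr, hfst]
  · have h3 : (!priorLowers.contains pr.1) = true :=
      List.of_mem_filter (p := fun pr : String × String => !(priorLowers.contains pr.1)) hpr
    rw [hfst] at h3
    simpa [List.contains_eq_mem] using h3

theorem pops_val_lower (d : PySem.Dict String String) (h : DictInv d) (p : String) (v : String)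
    (hv : d.get? (PySem.Str.lower p) = some v) : PySem.Str.lower v = PySem.Str.lower p := by
  have hmem := PySem.Dict.mem_items_of_get?_eq_some d hv
  exact (h.2 _ hmem).symm

-- the combined list is strictly increasing under the (rank, lowercase) key
theorem pairwise_K (d : PySem.Dict String String) (h : DictInv d) :
    List.Pairwise (fun a b => Kf a < Kf b) (popsOf d ++ restMap d) := by
  have hsorted := PySem.List.sorted_pairwise (restDict d).keys (fun k => k)
  have hnds : (PySem.List.sorted (restDict d).keys (fun k => k) false).Nodup :=
    (PySem.List.sorted_perm (restDict d).keys (fun k => k) false).symm.nodup (restDict_inv d h).1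
  have hlt : List.Pairwise (· < ·) (PySem.List.sorted (restDict d).keys (fun k => k) false) :=
    (hsorted.and hnds).imp (fun hab => lt_of_le_of_ne hab.1 hab.2)
  rw [List.pairwise_append]
  refine ⟨?_, ?_, ?_⟩
  · -- within the priority part
    unfold popsOf
    rw [List.pairwise_filterMap]
    refine rank_pairwise.imp ?_
    intro p q hpq b hb b' hb'
    have e1 := pops_val_lower d h p b hb
    have e2 := pops_val_lower d h q b' hb'
    unfold Kf
    rw [Prod.Lex.lt_iff]
    left
    simpa [e1, e2] using hpq
  · -- within the sorted rest
    unfold restMap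
    rw [List.pairwise_map]
    refine hlt.imp_of_mem ?_
    intro a b ha hb hab
    have hamem : a ∈ (restDict d).keys := (PySem.List.mem_sorted _ _ _ _).1 ha
    have hbmem : b ∈ (restDict d).keys := (PySem.List.mem_sorted _ _ _ _).1 hb
    obtain ⟨ea, hna⟩ := rest_key_fact d h a hamem
    obtain ⟨eb, hnb⟩ := rest_key_fact d h b hbmem
    unfold Kf
    rw [Prod.Lex.lt_iff]
    right
    constructor
    · rw [ea, eb, rank_default a hna, rank_default b hnb]
      rfl
    · rw [ea, eb]; exact hab
  · -- priority before rest
    intro a ha b hb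
    unfold popsOf at ha
    obtain ⟨p, hp, hgp⟩ := List.mem_filterMap.1 ha
    unfold restMap at hb
    obtain ⟨k, hk, hfk⟩ := List.mem_map.1 hb
    have hkmem : k ∈ (restDict d).keys := (PySem.List.mem_sorted _ _ _ _).1 hk
    obtain ⟨ek, hnk⟩ := rest_key_fact d h k hkmem
    have ea := pops_val_lower d h p a hgp
    unfold Kf
    rw [Prod.Lex.lt_iff]
    left
    rw [← hfk, ek, rank_default k hnk, ea]
    exact rank_lt p hp

theorem perm_K (d : PySem.Dict String String) (h : DictInv d) :
    (popsOf d ++ restMap d).Perm d.values := by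
  have hperm : (popsOf d ++ (restDict d).values).Perm d.values :=
    perm_pops propertyPriority d priority_lower_nodup h.1
  refine List.Perm.trans ?_ hperm
  apply List.Perm.append_left
  unfold restMap
  have hvals : (restDict d).values = (restDict d).keys.map (fun k => (restDict d).getD k "") :=
    PySem.Dict.values_eq_map_keys _ (restDict_inv d h).1 ""
  rw [hvals]
  exact (PySem.List.sorted_perm _ _ _).map _

-- ===== VERDICT (by name: the statement is the Claim_ definition above) =====
theorem ordered_properties_py_spec : Claim_equal_ordered_properties_py := by
  intro values _
  unfold Spec_ordered_properties_py
  have hinv := dictInv_build values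
  have hA : ordered_properties_py values
      = popsOf (buildByLower values) ++ restMap (buildByLower values) := by
    show (propertyPriority.foldl (fun (st : List String × PySem.Dict String String) prop =>
        let key := PySem.Str.lower prop
        if st.2.contains key then
          match st.2.pop? key with
          | some (v, d') => (st.1 ++ [v], d')
          | none => st
        else st) ([], buildByLower values)).1
      ++ (PySem.List.sorted (propertyPriority.foldl (fun (st : List String × PySem.Dict String String) prop =>
        let key := PySem.Str.lower prop
        if st.2.contains key then
          match st.2.pop? key with
          | some (v, d') => (st.1 ++ [v], d')
          | none => st
        else st) ([], buildByLower values)).2.keys (fun k => k) false).map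
          (fun k => (propertyPriority.foldl (fun (st : List String × PySem.Dict String String) prop =>
        let key := PySem.Str.lower prop
        if st.2.contains key then
          match st.2.pop? key with
          | some (v, d') => (st.1 ++ [v], d')
          | none => st
        else st) ([], buildByLower values)).2.getD k "")
      = popsOf (buildByLower values) ++ restMap (buildByLower values)
    rw [foldA_spec propertyPriority [] (buildByLower values) priority_lower_nodup]
    rfl
  rw [hA]
  symm
  unfold ordered_properties_py_alt
  exact PySem.List.sorted_eq_of_perm_of_pairwise_lt _ _ _
    (perm_K _ hinv) (pairwise_K _ hinv)
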